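-- pv_equiv track=rewrite | github.com/OmniNode-ai/omnibase_core | src/omnibase_core/merge/geometric_conflict_classifier.py | _are_orthogonal
-- ===== SOURCE A (Python) =====
-- def _are_orthogonal(
--
--     base_value: object,
--     values: list[tuple[str, object]],
-- ) -> bool:
--     """Check if agent changes are non-overlapping (different keys modified)."""
--     if not isinstance(base_value, dict):
--         return False
--
--     changed_key_sets: list[set[str]] = []
--     for _, value in values:
--         if not isinstance(value, dict):
--             return False
--         all_keys = set(base_value.keys()) | set(value.keys())
--         changed = {k for k in all_keys if base_value.get(k) != value.get(k)}
--         changed_key_sets.append(changed)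
--
--     # If all agents made zero changes, that is IDENTICAL, not orthogonal.
--     # Empty sets are trivially disjoint, so without this guard the
--     # pairwise check below would incorrectly return True.
--     if all(len(cs) == 0 for cs in changed_key_sets):
--         return False
--
--     # All pairs must have disjoint change sets
--     for i in range(len(changed_key_sets)):
--         for j in range(i + 1, len(changed_key_sets)):
--             if changed_key_sets[i] & changed_key_sets[j]:
--                 return False
--
--     return True
-- ===== SOURCE B (Python) =====
-- def _are_orthogonal(
--     base_value: object,
--     values: list[tuple[str, object]],
-- ) -> bool:
--     """Check if agent changes are non-overlapping (different keys modified)."""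
--     if not isinstance(base_value, dict):
--         return False
--
--     change_sets: list[set[str]] = []
--     for _, value in values:
--         if not isinstance(value, dict):
--             return False
--         all_keys = set(base_value.keys()) | set(value.keys())
--         change_sets.append({k for k in all_keys if base_value.get(k) != value.get(k)})
--
--     # Orthogonal iff at least one change and no key is changed by two agents:
--     # the union loses an element exactly when some key is counted twice.
--     total = sum(len(cs) for cs in change_sets)
--     union = set().union(*change_sets)
--     return total > 0 and len(union) == total
-- ===== Notes on version B (the rewrite author's own statement) =====
-- stated objective: alternative
-- what changed: The nested pairwise intersection loop over the change sets is replaced by a single counting invariant: orthogonal iff the total number of changed keys is positive and equals the size of the union of all change sets (no key counted twice).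
import Mathlib
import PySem

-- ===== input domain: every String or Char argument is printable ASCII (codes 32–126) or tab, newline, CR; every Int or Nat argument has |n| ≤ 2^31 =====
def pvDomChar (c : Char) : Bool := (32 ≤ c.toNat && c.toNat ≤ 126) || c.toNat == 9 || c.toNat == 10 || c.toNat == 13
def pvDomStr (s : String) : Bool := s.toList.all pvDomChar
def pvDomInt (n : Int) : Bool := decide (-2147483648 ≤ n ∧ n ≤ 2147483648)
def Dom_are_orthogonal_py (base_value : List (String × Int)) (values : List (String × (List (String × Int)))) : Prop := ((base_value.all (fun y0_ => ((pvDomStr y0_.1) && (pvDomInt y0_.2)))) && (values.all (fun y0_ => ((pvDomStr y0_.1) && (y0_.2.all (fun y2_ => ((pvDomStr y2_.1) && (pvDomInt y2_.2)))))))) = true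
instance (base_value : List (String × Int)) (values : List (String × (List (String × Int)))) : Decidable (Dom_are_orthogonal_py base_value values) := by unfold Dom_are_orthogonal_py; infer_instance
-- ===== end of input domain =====

-- B replaces A's pairwise disjointness loop by one counting invariant (sum of
-- change-set sizes = size of their union, and positive); the isinstance guards of
-- the Python sources are vacuous under the typed signature.

-- ===== PORT A =====
-- shared first pass of both Pythons: the changed-key set of one agent
def pvChanged (base v : PySem.Dict String Int) : PySem.Set String :=
  let allKeys : PySem.Set String :=
    PySem.Set.union (PySem.Set.ofList base.keys) (PySem.Set.ofList v.keys)
  allKeys.filter (fun k => base.get? k != v.get? k)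

-- A's nested 'for i / for j in range(i+1, n)' loop over the change sets
def pvPairwiseOk : List (PySem.Set String) → Bool
  | [] => true
  | c :: rest =>
      (rest.all fun c' => (PySem.Set.inter c c').isEmpty) && pvPairwiseOk rest

def are_orthogonal_py (base_value : List (String × Int)) (values : List (String × (List (String × Int)))) : Bool :=
  let base := PySem.Dict.ofList base_value
  let changed_key_sets : List (PySem.Set String) :=
    values.foldl (fun acc p => acc ++ [pvChanged base (PySem.Dict.ofList p.2)]) []
  if changed_key_sets.all (fun cs => cs.length == 0) then false
  else pvPairwiseOk changed_key_sets

-- ===== PORT B =====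
def are_orthogonal_py_alt (base_value : List (String × Int)) (values : List (String × (List (String × Int)))) : Bool :=
  let base := PySem.Dict.ofList base_value
  let change_sets : List (PySem.Set String) :=
    values.map (fun p => pvChanged base (PySem.Dict.ofList p.2))
  let total := (change_sets.map List.length).sum
  let union := change_sets.foldl (fun u cs => PySem.Set.union u cs) PySem.Set.empty
  decide (0 < total) && (union.length == total)

-- ===== PRECONDITION & SPEC =====
def Spec_are_orthogonal_py (base_value : List (String × Int)) (values : List (String × (List (String × Int)))) (out : Bool) : Prop := out = are_orthogonal_py_alt base_value values
instance (base_value : List (String × Int)) (values : List (String × (List (String × Int)))) (out : Bool) : Decidable (Spec_are_orthogonal_py base_value values out) := by unfold Spec_are_orthogonal_py; infer_instance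

-- ===== CLAIM (what is proved, stated in full; the proofs are below) =====
def Claim_equal_are_orthogonal_py : Prop := ∀ (base_value : List (String × Int)) (values : List (String × (List (String × Int)))), Dom_are_orthogonal_py base_value values → Spec_are_orthogonal_py base_value values (are_orthogonal_py base_value values)

-- ===== LEMMAS AND PROOFS =====

theorem pvChanged_nodup (base v : PySem.Dict String Int) : (pvChanged base v).Nodup := by
  unfold pvChanged
  exact List.Nodup.filter _
    (PySem.Set.nodup_union _ _ (PySem.Set.nodup_ofList _))

-- length of one union step, for a duplicate-free second argument
theorem pv_len_union (s : List String) (c : List String) (hc : c.Nodup) :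
    (PySem.Set.union s c).length
      = s.length + (c.filter (fun y => !(PySem.Set.contains s y))).length := by
  have h : PySem.Set.union s c = s ++ (c.filter (fun y => !(PySem.Set.contains s y))) := by
    have := PySem.Set.update_eq_append_filter s c
    rw [PySem.Set.ofList_eq_self_of_nodup c hc] at this
    exact this
  rw [h, List.length_append]

theorem pv_foldl_union_le (css : List (List String)) (acc : List String)
    (h : ∀ cs ∈ css, cs.Nodup) :
    (css.foldl (fun u cs => PySem.Set.union u cs) acc).length
      ≤ acc.length + (css.map List.length).sum := by
  induction css generalizing acc with
  | nil => simp
  | cons c rest ih =>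
      simp only [List.foldl_cons, List.map_cons, List.sum_cons]
      calc (rest.foldl (fun u cs => PySem.Set.union u cs) (PySem.Set.union acc c)).length
          ≤ (PySem.Set.union acc c).length + (rest.map List.length).sum :=
            ih _ (fun cs hm => h cs (List.mem_cons_of_mem _ hm))
        _ ≤ acc.length + c.length + (rest.map List.length).sum := by
            rw [pv_len_union acc c (h c List.mem_cons_self)]
            have := List.length_filter_le (fun y => !(PySem.Set.contains acc y)) c
            omega
        _ = acc.length + (c.length + (rest.map List.length).sum) := by omega

-- the heart: the union has full length iff the sets are pairwise disjoint
-- (and disjoint from the accumulator)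
theorem pv_key (css : List (List String)) (acc : List String)
    (h : ∀ cs ∈ css, cs.Nodup) :
    ((css.foldl (fun u cs => PySem.Set.union u cs) acc).length
        = acc.length + (css.map List.length).sum)
      ↔ (pvPairwiseOk css = true ∧ ∀ cs ∈ css, ∀ x ∈ cs, x ∉ acc) := by
  induction css generalizing acc with
  | nil => simp [pvPairwiseOk]
  | cons c rest ih =>
      have hc : c.Nodup := h c List.mem_cons_self
      have hrest : ∀ cs ∈ rest, cs.Nodup := fun cs hm => h cs (List.mem_cons_of_mem _ hm)
      have hlen := pv_len_union acc c hc
      have hfle := List.length_filter_le (fun y => !(PySem.Set.contains acc y)) c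
      simp only [List.foldl_cons, List.map_cons, List.sum_cons]
      constructor
      · intro heq
        -- both inequalities in the chain must be equalities
        have hle := pv_foldl_union_le rest (PySem.Set.union acc c) hrest
        have hfull : (c.filter (fun y => !(PySem.Set.contains acc y))).length = c.length := by
          omega
        have hdisj : ∀ x ∈ c, x ∉ acc := by
          have hfa := List.length_filter_eq_length_iff.mp hfull
          intro x hx hmem
          have hb := hfa x hx
          simp at hb
          exact hb hmem
        have heq' : (rest.foldl (fun u cs => PySem.Set.union u cs) (PySem.Set.union acc c)).length
            = (PySem.Set.union acc c).length + (rest.map List.length).sum := by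
          omega
        obtain ⟨hpw, hd⟩ := (ih (PySem.Set.union acc c) hrest).mp heq'
        refine ⟨?_, ?_⟩
        · simp only [pvPairwiseOk, Bool.and_eq_true, List.all_eq_true]
          refine ⟨fun c' hm => ?_, hpw⟩
          rw [List.isEmpty_iff]
          have : PySem.Set.inter c c' = c.filter (fun x => PySem.Set.contains c' x) := rfl
          rw [this, List.filter_eq_nil_iff]
          intro x hx hcont
          have hx' : x ∈ c' := (PySem.Set.contains_iff c' x).mp hcont
          exact hd c' hm x hx' ((PySem.Set.mem_union acc c x).mpr (Or.inr hx))
        · intro cs hm x hx hmem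
          rcases List.mem_cons.mp hm with rfl | hm'
          · exact hdisj x hx hmem
          · exact hd cs hm' x hx ((PySem.Set.mem_union acc c x).mpr (Or.inl hmem))
      · rintro ⟨hpw, hd⟩
        simp only [pvPairwiseOk, Bool.and_eq_true, List.all_eq_true] at hpw
        obtain ⟨hcd, hpw'⟩ := hpw
        have hdc : ∀ x ∈ c, x ∉ acc := fun x hx => hd c List.mem_cons_self x hx
        have hfull : (c.filter (fun y => !(PySem.Set.contains acc y))).length = c.length := by
          rw [List.length_filter_eq_length_iff]
          intro x hx
          cases hcc : PySem.Set.contains acc x with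
          | false => simp
          | true => exact absurd ((PySem.Set.contains_iff acc x).mp hcc) (hdc x hx)
        have hd' : ∀ cs ∈ rest, ∀ x ∈ cs, x ∉ PySem.Set.union acc c := by
          intro cs hm x hx hmem
          rcases (PySem.Set.mem_union acc c x).mp hmem with h1 | h1
          · exact hd cs (List.mem_cons_of_mem _ hm) x hx h1
          · have := hcd cs hm
            rw [List.isEmpty_iff] at this
            have : PySem.Set.inter c cs = [] := this
            have h2 : PySem.Set.inter c cs = c.filter (fun y => PySem.Set.contains cs y) := rfl
            rw [h2, List.filter_eq_nil_iff] at this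
            exact this x h1 ((PySem.Set.contains_iff cs x).mpr hx)
        have := (ih (PySem.Set.union acc c) hrest).mpr ⟨hpw', hd'⟩
        omega

theorem pv_total_zero (css : List (List String)) :
    (css.all (fun cs => cs.length == 0) = true) ↔ (css.map List.length).sum = 0 := by
  simp [List.all_eq_true, List.sum_eq_zero_iff]

-- ===== VERDICT (by name: the statement is the Claim_ definition above) =====
theorem are_orthogonal_py_spec : Claim_equal_are_orthogonal_py := by
  intro base_value values _
  unfold Spec_are_orthogonal_py
  simp only [are_orthogonal_py, are_orthogonal_py_alt,
    PySem.List.foldl_append_singleton_eq_map, List.nil_append]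
  set base := PySem.Dict.ofList base_value with hbase
  set css := values.map (fun p => pvChanged base (PySem.Dict.ofList p.2)) with hcss
  have hnd : ∀ cs ∈ css, cs.Nodup := by
    intro cs hm
    rw [hcss] at hm
    obtain ⟨p, _, rfl⟩ := List.mem_map.mp hm
    exact pvChanged_nodup _ _
  by_cases hall : css.all (fun cs => cs.length == 0) = true
  · have h0 : (css.map List.length).sum = 0 := (pv_total_zero css).mp hall
    simp [hall, h0]
  · have h0 : (css.map List.length).sum ≠ 0 := fun h => hall ((pv_total_zero css).mpr h)
    have hpos : 0 < (css.map List.length).sum := Nat.pos_of_ne_zero h0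
    rw [if_neg hall]
    have hkey := pv_key css [] hnd
    simp only [List.length_nil, Nat.zero_add, List.not_mem_nil, not_false_iff,
      imp_true_iff, and_true] at hkey
    have hB : ((css.foldl (fun u cs => PySem.Set.union u cs) PySem.Set.empty).length
        == (css.map List.length).sum) = pvPairwiseOk css := by
      by_cases hpw : pvPairwiseOk css = true
      · rw [hpw, beq_iff_eq]
        exact hkey.mpr hpw
      · rw [Bool.eq_false_iff.mpr hpw]
        rw [beq_eq_false_iff_ne]
        intro heq
        exact hpw (hkey.mp heq)
    rw [hB]
    simp [hpos]
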